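-- pv_equiv track=rewrite | github.com/hyperforest/game | v2/module/interface.py | generate_text_box
-- ===== SOURCE A (Python) =====
-- def generate_text_box(texts, h_margin=1, v_margin=1,
--     h_border='|', v_border='-', h_width=1, v_width=1):
--
--     if isinstance(texts, str):
--         texts = texts.split('\n')
--
--     inner_width = max(map(len, texts))
--     inner_width += (2 * h_margin)
--     width = inner_width + (2 * h_width * len(h_border))
--
--     def add_vmargin(text):
--         for _ in range(v_margin):
--             text += (h_border * h_width)
--             text += (' ' * inner_width)
--             text += (h_border * h_width)
--             text += '\n'
--         return text
--
--     # start decorating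
--     result = '\n'.join([v_border * width] * v_width)
--     result += '\n'
--
--     result = add_vmargin(result)
--     for _ in range(len(texts)):
--         l_margin = (inner_width - len(texts[_])) // 2
--         r_margin = inner_width - (len(texts[_]) + l_margin)
--
--         result += (h_border * h_width)
--         result += (' ' * l_margin)
--         result += texts[_]
--         result += (' ' * r_margin)
--         result += (h_border * h_width)
--         result += '\n'
--     result = add_vmargin(result)
--
--     result += '\n'.join([v_border * width] * v_width)
--     return result
-- ===== SOURCE B (Python) =====
-- def generate_text_box(texts, h_margin=1, v_margin=1,
--     h_border='|', v_border='-', h_width=1, v_width=1):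
--
--     if isinstance(texts, str):
--         texts = texts.split('\n')
--
--     inner_width = max(map(len, texts)) + 2 * h_margin
--     width = inner_width + 2 * h_width * len(h_border)
--     n = len(texts)
--     m = max(v_margin, 0)
--
--     # interior line #i, computed directly from its index (margin rows are the
--     # i < m and i >= m + n indices); no accumulator, no helper passes
--     def line(i):
--         s = texts[i - m] if m <= i < m + n else ''
--         l = (inner_width - len(s)) // 2
--         return (h_border * h_width + ' ' * l + s
--                 + ' ' * (inner_width - len(s) - l) + h_border * h_width)
--
--     bb = '\n'.join([v_border * width] * v_width)
--     return bb + '\n' + '\n'.join(line(i) for i in range(n + 2 * m)) + '\n' + bb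
-- ===== Notes on version B (the rewrite author's own statement) =====
-- stated objective: alternative
-- what changed: B replaces A's sequential accumulation (border block, add_vmargin helper applied twice, then an index loop appending newline-terminated rows) with random-access generation: interior line number i is a pure function of its index (picking texts[i-m] or the empty row by index arithmetic), and the result is three newline-joined pieces with no accumulator and no helper passes.
import Mathlib
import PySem

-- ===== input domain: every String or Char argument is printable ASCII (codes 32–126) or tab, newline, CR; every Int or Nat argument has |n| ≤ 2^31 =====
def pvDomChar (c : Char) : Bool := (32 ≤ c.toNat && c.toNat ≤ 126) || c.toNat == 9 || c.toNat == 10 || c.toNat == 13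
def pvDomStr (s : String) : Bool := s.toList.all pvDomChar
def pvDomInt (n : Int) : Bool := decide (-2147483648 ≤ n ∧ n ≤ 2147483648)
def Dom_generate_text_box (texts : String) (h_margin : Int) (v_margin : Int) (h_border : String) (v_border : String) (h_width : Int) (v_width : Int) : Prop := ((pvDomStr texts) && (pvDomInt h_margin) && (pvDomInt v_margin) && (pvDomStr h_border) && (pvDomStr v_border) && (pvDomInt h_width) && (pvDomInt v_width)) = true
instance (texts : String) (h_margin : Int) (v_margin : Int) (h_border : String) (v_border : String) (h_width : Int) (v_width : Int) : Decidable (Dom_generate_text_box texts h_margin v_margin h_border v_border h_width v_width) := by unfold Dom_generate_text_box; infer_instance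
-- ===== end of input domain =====

-- B replaces A's sequential accumulation (add_vmargin helper run twice, an index loop appending
-- newline-terminated rows) by random-access generation: interior line number i is a pure function
-- of its index, and the result is three newline-joined pieces (objective: alternative decomposition).
-- ===== PORT A =====
def generate_text_box (texts : String) (h_margin : Int) (v_margin : Int) (h_border : String) (v_border : String) (h_width : Int) (v_width : Int) : String :=
  let ts : List (List Char) := PySem.Chars.splitOn texts.toList ['\n']
  let inner_width : Int := ((PySem.List.max? (ts.map (fun t => (t.length : Int))) (fun x => x)).getD 0) + 2 * h_margin
  let width : Int := inner_width + 2 * h_width * (h_border.toList.length : Int)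
  let addVmargin : List Char → List Char := fun text =>
    (PySem.List.pyRange 0 v_margin 1).foldl (fun acc _ =>
      acc ++ PySem.List.pyRepeat h_border.toList h_width
          ++ PySem.List.pyRepeat [' '] inner_width
          ++ PySem.List.pyRepeat h_border.toList h_width ++ ['\n']) text
  let result : List Char := PySem.Chars.join ['\n'] (PySem.List.pyRepeat [PySem.List.pyRepeat v_border.toList width] v_width)
  let result := result ++ ['\n']
  let result := addVmargin result
  let result := (PySem.List.pyRange 0 (ts.length : Int) 1).foldl (fun acc i =>
      let t := PySem.List.pyGetD ts i []
      let l_margin := PySem.Int.floordiv (inner_width - (t.length : Int)) 2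
      let r_margin := inner_width - ((t.length : Int) + l_margin)
      acc ++ PySem.List.pyRepeat h_border.toList h_width
          ++ PySem.List.pyRepeat [' '] l_margin
          ++ t
          ++ PySem.List.pyRepeat [' '] r_margin
          ++ PySem.List.pyRepeat h_border.toList h_width ++ ['\n']) result
  let result := addVmargin result
  String.ofList (result ++ PySem.Chars.join ['\n'] (PySem.List.pyRepeat [PySem.List.pyRepeat v_border.toList width] v_width))

-- ===== PORT B =====
-- B-side helper: the Python nested function `line` — interior line #i, by index arithmetic
def pvLine (ts : List (List Char)) (iw m n : Int) (h_border : List Char) (h_width : Int) (i : Int) : List Char :=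
  let s : List Char := if m ≤ i ∧ i < m + n then PySem.List.pyGetD ts (i - m) [] else []
  let l : Int := PySem.Int.floordiv (iw - (s.length : Int)) 2
  PySem.List.pyRepeat h_border h_width ++ PySem.List.pyRepeat [' '] l ++ s
    ++ PySem.List.pyRepeat [' '] (iw - (s.length : Int) - l) ++ PySem.List.pyRepeat h_border h_width

def generate_text_box_alt (texts : String) (h_margin : Int) (v_margin : Int) (h_border : String) (v_border : String) (h_width : Int) (v_width : Int) : String :=
  let ts : List (List Char) := PySem.Chars.splitOn texts.toList ['\n']
  let inner_width : Int := ((PySem.List.max? (ts.map (fun t => (t.length : Int))) (fun x => x)).getD 0) + 2 * h_margin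
  let width : Int := inner_width + 2 * h_width * (h_border.toList.length : Int)
  let n : Int := (ts.length : Int)
  let m : Int := max v_margin 0
  let bb : List Char := PySem.Chars.join ['\n'] (PySem.List.pyRepeat [PySem.List.pyRepeat v_border.toList width] v_width)
  String.ofList (bb ++ ['\n']
    ++ PySem.Chars.join ['\n'] ((PySem.List.pyRange 0 (n + 2 * m) 1).map (pvLine ts inner_width m n h_border.toList h_width))
    ++ ['\n'] ++ bb)

-- ===== PRECONDITION & SPEC =====
def Spec_generate_text_box (texts : String) (h_margin : Int) (v_margin : Int) (h_border : String) (v_border : String) (h_width : Int) (v_width : Int) (out : String) : Prop := out = generate_text_box_alt texts h_margin v_margin h_border v_border h_width v_width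
instance (texts : String) (h_margin : Int) (v_margin : Int) (h_border : String) (v_border : String) (h_width : Int) (v_width : Int) (out : String) : Decidable (Spec_generate_text_box texts h_margin v_margin h_border v_border h_width v_width out) := by unfold Spec_generate_text_box; infer_instance

-- ===== CLAIM (what is proved, stated in full; the proofs are below) =====
def Claim_equal_generate_text_box : Prop := ∀ (texts : String) (h_margin : Int) (v_margin : Int) (h_border : String) (v_border : String) (h_width : Int) (v_width : Int), Dom_generate_text_box texts h_margin v_margin h_border v_border h_width v_width → Spec_generate_text_box texts h_margin v_margin h_border v_border h_width v_width (generate_text_box texts h_margin v_margin h_border v_border h_width v_width)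

-- ===== LEMMAS AND PROOFS =====

-- the common normal form of one interior line (A's centering body, without the trailing '\n')
def pvC (iw : Int) (side : List Char) (s : List Char) : List Char :=
  side ++ PySem.List.pyRepeat [' '] (PySem.Int.floordiv (iw - (s.length : Int)) 2) ++ s
    ++ PySem.List.pyRepeat [' '] (iw - (s.length : Int) - PySem.Int.floordiv (iw - (s.length : Int)) 2) ++ side

-- pvLine is pvC of the indexed row
theorem pvLine_eq (ts : List (List Char)) (iw m n : Int) (hb : List Char) (hw i : Int) :
    pvLine ts iw m n hb hw i
      = pvC iw (PySem.List.pyRepeat hb hw) (if m ≤ i ∧ i < m + n then PySem.List.pyGetD ts (i - m) [] else []) := by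
  simp [pvLine, pvC]

-- centering the empty row: A's vertical-margin row content
theorem pvC_nil (iw : Int) (side : List Char) :
    pvC iw side [] = side ++ PySem.List.pyRepeat [' '] iw ++ side := by
  have h1 : PySem.Int.floordiv iw 2 * 2 ≤ iw :=
    (PySem.Int.le_floordiv_iff_mul_le (by norm_num)).1 le_rfl
  have h2 : iw < (PySem.Int.floordiv iw 2 + 1) * 2 :=
    (PySem.Int.floordiv_lt_iff_lt_mul (by norm_num)).1 (lt_add_one _)
  simp only [pvC, List.length_nil, Nat.cast_zero, Int.sub_zero, PySem.List.pyRepeat_singleton,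
    List.append_nil]
  have h3 : List.replicate iw.toNat ' ' = List.replicate (PySem.Int.floordiv iw 2).toNat ' '
      ++ List.replicate (iw - PySem.Int.floordiv iw 2).toNat ' ' := by
    rw [← List.replicate_add]; congr 1; omega
  rw [h3]
  simp [List.append_assoc]

-- a fold appending a constant block n times
theorem pv_const_append_loop (n : Int) (v t : List Char) :
    (PySem.List.pyRange 0 n 1).foldl (fun acc _ => acc ++ v) t
      = t ++ (List.replicate n.toNat v).flatten := by
  rw [PySem.List.foldl_append_eq_flatMap (g := fun _ => v)]
  congr 1
  have hgen : ∀ (l : List Int), l.flatMap (fun _ => v) = (List.replicate l.length v).flatten := by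
    intro l; induction l with
    | nil => simp
    | cons a l ih => simp [List.replicate_succ, ih]
  rw [hgen, PySem.List.length_pyRange_one]
  norm_num

-- A's index loop over texts equals one pass of '\n'-terminated pvC rows
theorem pv_text_loop (ts : List (List Char)) (iw : Int) (side init : List Char) :
    List.foldl (fun acc i =>
      acc ++ side
          ++ PySem.List.pyRepeat [' '] (PySem.Int.floordiv (iw - ((PySem.List.pyGetD ts i []).length : Int)) 2)
          ++ PySem.List.pyGetD ts i []
          ++ PySem.List.pyRepeat [' '] (iw - (((PySem.List.pyGetD ts i []).length : Int)
              + PySem.Int.floordiv (iw - ((PySem.List.pyGetD ts i []).length : Int)) 2))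
          ++ side ++ ['\n']) init (PySem.List.pyRange 0 (ts.length : Int))
    = init ++ (ts.map (fun t => pvC iw side t ++ ['\n'])).flatten := by
  have h := PySem.List.foldl_pyRange_zero_pyGetD' ts ([] : List Char)
      (fun acc t => acc ++ side ++ PySem.List.pyRepeat [' '] (PySem.Int.floordiv (iw - (t.length : Int)) 2)
          ++ t ++ PySem.List.pyRepeat [' '] (iw - ((t.length : Int) + PySem.Int.floordiv (iw - (t.length : Int)) 2))
          ++ side ++ ['\n']) init
  refine h.trans ?_
  clear h
  induction ts generalizing init with
  | nil => simp
  | cons a l ih =>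
    rw [List.foldl_cons, ih]
    simp [pvC, List.append_assoc]
    omega

-- splitOn never produces the empty list of pieces
theorem pv_splitOn_go_ne_nil (sep : List Char) :
    ∀ (fuel : Nat) (l cur : List Char) (acc : List (List Char)),
      PySem.Chars.splitOn.go sep fuel l cur acc ≠ [] := by
  intro fuel
  induction fuel with
  | zero =>
    intro l cur acc
    simp [PySem.Chars.splitOn.go]
  | succ k ih =>
    intro l cur acc
    cases l with
    | nil => simp [PySem.Chars.splitOn.go]
    | cons c rest =>
      rw [PySem.Chars.splitOn.go]
      split
      · exact ih _ _ _
      · exact ih _ _ _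

theorem pv_splitOn_ne_nil (s sep : List Char) : PySem.Chars.splitOn s sep ≠ [] :=
  pv_splitOn_go_ne_nil sep _ s [] []

-- '\n'.join L plus a final '\n' = concatenation of the '\n'-terminated lines, for nonempty L
theorem pv_join_newline (L : List (List Char)) (h : L ≠ []) :
    PySem.Chars.join ['\n'] L ++ ['\n'] = (L.map (fun x => x ++ ['\n'])).flatten := by
  induction L with
  | nil => exact absurd rfl h
  | cons a t ih =>
    cases t with
    | nil => simp [PySem.Chars.join_singleton]
    | cons b u =>
      rw [PySem.Chars.join_cons_cons]
      simp only [List.map_cons, List.flatten_cons]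
      rw [List.append_assoc, List.append_assoc, ih (by simp)]
      simp

-- B's indexed line list is: m empty-centered rows, the centered texts, m empty-centered rows
theorem pv_line_list (ts : List (List Char)) (iw : Int) (hb : List Char) (hw v_margin : Int) :
    (PySem.List.pyRange 0 ((ts.length : Int) + 2 * max v_margin 0) 1).map
        (pvLine ts iw (max v_margin 0) (ts.length : Int) hb hw)
      = List.replicate (max v_margin 0).toNat (pvC iw (PySem.List.pyRepeat hb hw) [])
        ++ ts.map (pvC iw (PySem.List.pyRepeat hb hw))
        ++ List.replicate (max v_margin 0).toNat (pvC iw (PySem.List.pyRepeat hb hw) []) := by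
  have hm0 : (0:Int) ≤ max v_margin 0 := le_max_right _ _
  set m : Int := max v_margin 0 with hm
  set n : Int := (ts.length : Int) with hn
  have hn0 : 0 ≤ n := by positivity
  have hseg1 : (PySem.List.pyRange 0 m 1).map (pvLine ts iw m n hb hw)
      = List.replicate m.toNat (pvC iw (PySem.List.pyRepeat hb hw) []) := by
    rw [List.map_congr_left (g := fun _ => pvC iw (PySem.List.pyRepeat hb hw) [])
        (fun i hi => by
          rw [PySem.List.mem_pyRange_one] at hi
          rw [pvLine_eq, if_neg (by omega)])]
    rw [List.map_const', PySem.List.length_pyRange_one]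
    congr 1
    omega
  have hseg3 : (PySem.List.pyRange (m + n) (n + 2 * m) 1).map (pvLine ts iw m n hb hw)
      = List.replicate m.toNat (pvC iw (PySem.List.pyRepeat hb hw) []) := by
    rw [List.map_congr_left (g := fun _ => pvC iw (PySem.List.pyRepeat hb hw) [])
        (fun i hi => by
          rw [PySem.List.mem_pyRange_one] at hi
          rw [pvLine_eq, if_neg (by omega)])]
    rw [List.map_const', PySem.List.length_pyRange_one]
    congr 1
    omega
  have hseg2 : (PySem.List.pyRange m (m + n) 1).map (pvLine ts iw m n hb hw)
      = ts.map (pvC iw (PySem.List.pyRepeat hb hw)) := by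
    rw [List.map_congr_left
        (g := fun i => pvC iw (PySem.List.pyRepeat hb hw) (PySem.List.pyGetD ts (i - m) []))
        (fun i hi => by
          rw [PySem.List.mem_pyRange_one] at hi
          rw [pvLine_eq, if_pos (by omega)])]
    rw [PySem.List.pyRange_one m (m + n), List.map_map]
    have hcomp : ((fun i => pvC iw (PySem.List.pyRepeat hb hw) (PySem.List.pyGetD ts (i - m) []))
          ∘ (fun k : Nat => m + (k : Int)))
        = (fun k : Nat => pvC iw (PySem.List.pyRepeat hb hw) (PySem.List.pyGetD ts (k : Int) [])) := by
      funext k; simp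
    rw [hcomp]
    have hgd : ((PySem.List.pyRange 0 n 1).map (fun j => PySem.List.pyGetD ts j [])).map
          (pvC iw (PySem.List.pyRepeat hb hw))
        = ts.map (pvC iw (PySem.List.pyRepeat hb hw)) := by
      rw [hn, PySem.List.map_pyGetD_pyRange_zero']
    rw [← hgd, PySem.List.pyRange_one 0 n, List.map_map, List.map_map]
    have h2 : (m + n - m).toNat = (n - 0).toNat := by omega
    rw [h2]
    exact List.map_congr_left (fun k _ => by simp [Function.comp])
  rw [PySem.List.pyRange_one_append 0 m (n + 2 * m) hm0 (by omega),
      PySem.List.pyRange_one_append m (m + n) (n + 2 * m) (by omega) (by omega),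
      List.map_append, List.map_append, hseg1, hseg2, hseg3, List.append_assoc]

-- ===== VERDICT (by name: the statement is the Claim_ definition above) =====
theorem generate_text_box_spec : Claim_equal_generate_text_box := by
  intro texts h_margin v_margin h_border v_border h_width v_width _
  unfold Spec_generate_text_box
  simp only [generate_text_box, generate_text_box_alt]
  set ts : List (List Char) := PySem.Chars.splitOn texts.toList ['\n'] with hts
  set iw : Int := ((PySem.List.max? (ts.map (fun t => (t.length : Int))) (fun x => x)).getD 0) + 2 * h_margin with hiw
  set width : Int := iw + 2 * h_width * (h_border.toList.length : Int) with hwidth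
  set side : List Char := PySem.List.pyRepeat h_border.toList h_width with hside
  set top : List Char := PySem.Chars.join ['\n'] (PySem.List.pyRepeat [PySem.List.pyRepeat v_border.toList width] v_width) with htop
  set m : Int := max v_margin 0 with hm
  -- A side: normalise the two margin folds and the text fold
  have hrow : (fun (acc : List Char) (_ : Int) =>
        acc ++ side ++ PySem.List.pyRepeat [' '] iw ++ side ++ ['\n'])
      = (fun acc _ => acc ++ (side ++ PySem.List.pyRepeat [' '] iw ++ side ++ ['\n'])) := by
    funext acc i; simp [List.append_assoc]
  rw [hrow, pv_const_append_loop, pv_const_append_loop]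
  rw [pv_text_loop]
  -- B side: the indexed line list, then the join
  rw [pv_line_list ts iw h_border.toList h_width v_margin, ← hside, ← hm]
  have hLne : (List.replicate m.toNat (pvC iw side []) ++ ts.map (pvC iw side)
      ++ List.replicate m.toNat (pvC iw side [])) ≠ [] := by
    have hts' := pv_splitOn_ne_nil texts.toList ['\n']
    rw [← hts] at hts'
    intro hnil
    have hlen := congrArg List.length hnil
    simp only [List.length_append, List.length_replicate, List.length_map, List.length_nil] at hlen
    exact hts' (List.length_eq_zero_iff.mp (by omega))
  rw [show top ++ ['\n']
        ++ PySem.Chars.join ['\n'] (List.replicate m.toNat (pvC iw side []) ++ ts.map (pvC iw side)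
            ++ List.replicate m.toNat (pvC iw side []))
        ++ ['\n'] ++ top
      = top ++ ['\n']
        ++ (PySem.Chars.join ['\n'] (List.replicate m.toNat (pvC iw side []) ++ ts.map (pvC iw side)
            ++ List.replicate m.toNat (pvC iw side [])) ++ ['\n']) ++ top by
      simp [List.append_assoc]]
  rw [pv_join_newline _ hLne]
  -- both sides are now flat concatenations of the same blocks
  have hmtoNat : v_margin.toNat = m.toNat := by omega
  simp only [List.map_append, List.map_replicate, List.flatten_append]
  have hrep : (List.replicate m.toNat (pvC iw side [] ++ ['\n'])).flatten
      = (List.replicate v_margin.toNat (side ++ PySem.List.pyRepeat [' '] iw ++ side ++ ['\n'])).flatten := by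
    rw [hmtoNat, pvC_nil]
  rw [← hrep]
  simp [List.append_assoc, Function.comp_def]
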